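-- pv_equiv track=rewrite | github.com/etiedem/adventofcode | 2017/python/day16/day16.py | solve
-- ===== SOURCE A (Python) =====
-- from collections import deque
--
-- def solve(data: str, start: str):
--     programs = deque(start)
--     for instr in data.split(","):
--         match instr[0]:
--             case "s":
--                 programs.rotate(int(instr[1:]))
--             case "x":
--                 a, b = map(int, instr[1:].split("/"))
--                 programs[a], programs[b] = programs[b], programs[a]
--             case "p":
--                 a, b = instr[1:].split("/")
--                 idxa = find(programs, a)
--                 idxb = find(programs, b)
--                 programs[idxa], programs[idxb] = programs[idxb], programs[idxa]
--     return "".join(programs)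
--
-- def find(search, target):
--     for idx, item in enumerate(search):
--         if item == target:
--             return idx
--     return None
-- ===== SOURCE B (Python) =====
-- def solve(data: str, start: str):
--     # Offset-based dance: keep a fixed array plus a rotation offset; spins are O(1).
--     lst = list(start)
--     n = len(lst)
--     off = 0
--     for instr in data.split(","):
--         op, rest = instr[0], instr[1:]
--         if op == "s":
--             k = int(rest)
--             off = (off - k) % n if n else 0
--         elif op == "x":
--             a, b = map(int, rest.split("/"))
--             i, j = (a + off) % n, (b + off) % n
--             lst[i], lst[j] = lst[j], lst[i]
--         elif op == "p":
--             a, b = rest.split("/")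
--             i = pfind(lst, off, a)
--             j = pfind(lst, off, b)
--             lst[i], lst[j] = lst[j], lst[i]
--     return "".join(lst[off:] + lst[:off])
--
-- def pfind(lst, off, target):
--     n = len(lst)
--     for k in range(n):
--         p = (k + off) % n
--         if lst[p] == target:
--             return p
--     return None
-- ===== Notes on version B (the rewrite author's own statement) =====
-- stated objective: alternative
-- what changed: B keeps the programs in a fixed list plus an integer rotation offset instead of bodily rotating a deque: spins become O(1) offset arithmetic, swaps translate logical to physical indices with a modulus, and the string is rebuilt from the offset once at the end.
import Mathlib
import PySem

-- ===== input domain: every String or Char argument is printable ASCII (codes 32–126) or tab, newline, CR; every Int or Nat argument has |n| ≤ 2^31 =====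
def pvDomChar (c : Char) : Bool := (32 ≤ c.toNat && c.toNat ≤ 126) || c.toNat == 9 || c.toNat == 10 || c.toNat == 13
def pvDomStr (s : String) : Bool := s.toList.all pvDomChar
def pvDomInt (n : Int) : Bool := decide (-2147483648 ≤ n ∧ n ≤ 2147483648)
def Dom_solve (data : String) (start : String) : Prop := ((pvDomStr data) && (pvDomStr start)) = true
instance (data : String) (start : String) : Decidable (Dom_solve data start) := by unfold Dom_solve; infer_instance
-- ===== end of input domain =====

-- B replaces the bodily-rotated deque by a fixed array plus an integer rotation offset (a different
-- state representation); equivalence is proved on Pre_solve (the inputs on which the Python A returns).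

-- ===== PORT A =====

-- exact model of deque.rotate(k): rotate right by k (any sign), no-op on the empty deque
def pyRotate (l : List Char) (k : Int) : List Char :=
  if l.length = 0 then l
  else
    let m := (PySem.Int.mod k (l.length : Int)).toNat
    l.drop (l.length - m) ++ l.take (l.length - m)

-- A's helper `find`: first index whose (1-char-string) item equals target, None if absent
def findA (l : List Char) (target : List Char) (i : Nat) : Option Nat :=
  match l with
  | [] => none
  | c :: rest => if target = [c] then some i else findA rest target (i + 1)

-- programs[a], programs[b] = programs[b], programs[a]  (negative indices as in Python; none = IndexError/TypeError path)
def swapA (st : List Char) (a b : Int) : Option (List Char) :=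
  (PySem.List.pyGet? st a).bind fun va =>
  (PySem.List.pyGet? st b).bind fun vb =>
  (PySem.List.pySet? st a vb).bind fun st1 =>
  PySem.List.pySet? st1 b va

def stepA (st : List Char) (instr : List Char) : Option (List Char) :=
  match instr with
  | [] => none   -- instr[0] raises IndexError
  | c :: rest =>
    if c = 's' then
      (PySem.Int.ofChars? rest).map (pyRotate st)
    else if c = 'x' then
      match PySem.Chars.splitOn rest ['/'] with
      | [sa, sb] =>
        match PySem.Int.ofChars? sa, PySem.Int.ofChars? sb with
        | some a, some b => swapA st a b
        | _, _ => none
      | _ => none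
    else if c = 'p' then
      match PySem.Chars.splitOn rest ['/'] with
      | [sa, sb] =>
        match findA st sa 0, findA st sb 0 with
        | some ia, some ib => swapA st (ia : Int) (ib : Int)
        | _, _ => none
      | _ => none
    else some st   -- no matching case: no-op

def solve (data : String) (start : String) : String :=
  match (PySem.Chars.splitOn data.toList [',']).foldl
      (fun acc instr => acc.bind (fun st => stepA st instr)) (some start.toList) with
  | some l => String.ofList l
  | none => ""

-- ===== PORT B =====

-- Source B pfind: for k in range(n): p = (k+off)%n; return p on first match (fuel = remaining iterations)
def pfindGo (lst : List Char) (off : Int) (t : List Char) (k : Nat) (fuel : Nat) : Option Nat :=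
  match fuel with
  | 0 => none
  | f + 1 =>
    let p := (PySem.Int.mod ((k : Int) + off) (lst.length : Int)).toNat
    match lst[p]? with
    | some c => if t = [c] then some p else pfindGo lst off t (k + 1) f
    | none => none

def pfindB (lst : List Char) (off : Int) (t : List Char) : Option Nat :=
  pfindGo lst off t 0 lst.length

-- lst[i], lst[j] = lst[j], lst[i]  (indices already physical and non-negative in Source B)
def swapB (lst : List Char) (i j : Nat) : Option (List Char) :=
  lst[i]?.bind fun vi => lst[j]?.bind fun vj => some ((lst.set i vj).set j vi)

def stepB (st : List Char × Int) (instr : List Char) : Option (List Char × Int) :=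
  match instr with
  | [] => none
  | c :: rest =>
    if c = 's' then
      match PySem.Int.ofChars? rest with
      | some k => some (st.1, if st.1.length = 0 then 0 else PySem.Int.mod (st.2 - k) (st.1.length : Int))
      | none => none
    else if c = 'x' then
      match PySem.Chars.splitOn rest ['/'] with
      | [sa, sb] =>
        match PySem.Int.ofChars? sa, PySem.Int.ofChars? sb with
        | some a, some b =>
          if st.1.length = 0 then none   -- (a+off) % 0 raises ZeroDivisionError
          else
            (swapB st.1 (PySem.Int.mod (a + st.2) (st.1.length : Int)).toNat
                        (PySem.Int.mod (b + st.2) (st.1.length : Int)).toNat).map (fun l => (l, st.2))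
        | _, _ => none
      | _ => none
    else if c = 'p' then
      match PySem.Chars.splitOn rest ['/'] with
      | [sa, sb] =>
        match pfindB st.1 st.2 sa, pfindB st.1 st.2 sb with
        | some i, some j => (swapB st.1 i j).map (fun l => (l, st.2))
        | _, _ => none
      | _ => none
    else some st

def solve_alt (data : String) (start : String) : String :=
  match (PySem.Chars.splitOn data.toList [',']).foldl
      (fun acc instr => acc.bind (fun st => stepB st instr)) (some (start.toList, (0 : Int))) with
  | some (lst, off) => String.ofList (lst.drop off.toNat ++ lst.take off.toNat)
  | none => ""

-- ===== PRECONDITION & SPEC =====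

-- one instruction is safe w.r.t. a sequence with character multiset cs:
-- nonempty; 's' rest parses as int; 'x' rest is exactly two ints in deque range; 'p' rest is exactly
-- two single characters present in the sequence; any other first character is a no-op and always safe.
def preInstrB (cs : List Char) (instr : List Char) : Bool :=
  match instr with
  | [] => false
  | c :: rest =>
    if c = 's' then (PySem.Int.ofChars? rest).isSome
    else if c = 'x' then
      match PySem.Chars.splitOn rest ['/'] with
      | [sa, sb] =>
        match PySem.Int.ofChars? sa, PySem.Int.ofChars? sb with
        | some a, some b =>
          decide (-(cs.length : Int) ≤ a) && decide (a < (cs.length : Int)) &&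
          decide (-(cs.length : Int) ≤ b) && decide (b < (cs.length : Int))
        | _, _ => false
      | _ => false
    else if c = 'p' then
      match PySem.Chars.splitOn rest ['/'] with
      | [sa, sb] => cs.any (fun ca => decide (sa = [ca])) && cs.any (fun cb => decide (sb = [cb]))
      | _ => false
    else true

-- Pre_solve = exactly the inputs on which the Python A returns (otherwise it raises
-- IndexError/ValueError/TypeError/ZeroDivisionError on some instruction)
def Pre_solve (data : String) (start : String) : Prop :=
  (PySem.Chars.splitOn data.toList [',']).all (preInstrB start.toList) = true
instance (data : String) (start : String) : Decidable (Pre_solve data start) := by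
  unfold Pre_solve; infer_instance

def pvWitness_solve : String × String := ("s1,x0/1,pa/b,x-1/2", "abcd")

def Spec_solve (data : String) (start : String) (out : String) : Prop := out = solve_alt data start
instance (data : String) (start : String) (out : String) : Decidable (Spec_solve data start out) := by
  unfold Spec_solve; infer_instance

-- ===== CLAIM (what is proved, stated in full; the proofs are below) =====
def Claim_equal_solve : Prop := ∀ (data : String) (start : String), Dom_solve data start → Pre_solve data start → Spec_solve data start (solve data start)

-- ===== LEMMAS AND PROOFS =====

-- B's state invariant: the offset is 0 on the empty list, otherwise in [0, n)
def BInv (lst : List Char) (off : Int) : Prop :=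
  (lst = [] ∧ off = 0) ∨ (0 ≤ off ∧ off < lst.length)

lemma emod_index (x : Int) (m n : Nat) (hn : 0 < n)
    (h : (m : Int) % (n : Int) = x % (n : Int)) : m % n = (x % (n : Int)).toNat := by
  have hn' : (0 : Int) < n := by exact_mod_cast hn
  have h1 : 0 ≤ x % (n : Int) := Int.emod_nonneg x (by omega)
  have h2 : x % (n : Int) < n := Int.emod_lt_of_pos x hn'
  have h3 : ((m % n : Nat) : Int) = (m : Int) % (n : Int) := Int.natCast_emod m n
  omega

lemma rotate_set (l : List Char) (o i : Nat) (v : Char) (hi : i < l.length) :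
    (l.rotate o).set i v = (l.set ((i + o) % l.length) v).rotate o := by
  have hn : 0 < l.length := Nat.lt_of_le_of_lt (Nat.zero_le i) hi
  apply List.ext_getElem
  · simp
  · intro j h1 h2
    have hj : j < l.length := by simpa using h1
    have hmm : ((i + o) % l.length = (j + o) % l.length) ↔ i = j := by
      constructor
      · intro hmod
        have h4 : i ≡ j [MOD l.length] := Nat.ModEq.add_right_cancel' o hmod
        have h5 := Nat.mod_eq_of_lt hi
        have h6 := Nat.mod_eq_of_lt hj
        unfold Nat.ModEq at h4
        omega
      · intro h; rw [h]
    simp only [List.getElem_set, List.getElem_rotate, List.length_set]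
    by_cases hij : i = j
    · rw [if_pos hij, if_pos (hmm.mpr hij)]
    · rw [if_neg hij, if_neg (fun hc => hij (hmm.mp hc))]

lemma rotate_spin (l : List Char) (off k : Int) (h : BInv l off) :
    pyRotate (l.rotate off.toNat) k
      = l.rotate (if l.length = 0 then 0 else PySem.Int.mod (off - k) (l.length : Int)).toNat := by
  rcases h with ⟨hl, ho⟩ | ⟨h0, h1⟩
  · subst hl; subst ho; rfl
  · have hn : 0 < l.length := by omega
    have hn0 : l.length ≠ 0 := by omega
    have hnI : (0 : Int) < (l.length : Int) := by exact_mod_cast hn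
    unfold pyRotate
    simp only [List.length_rotate, PySem.Int.mod_eq_emod_of_pos hnI, if_neg hn0]
    set m := (k % (l.length : Int)).toNat with hm
    have hmIr : ((m : Int)) = k % (l.length : Int) := by
      have := Int.emod_nonneg k (by omega : (l.length : Int) ≠ 0)
      omega
    have hmlt : m < l.length := by
      have := Int.emod_lt_of_pos k hnI
      omega
    rw [← List.rotate_eq_drop_append_take (by rw [List.length_rotate]; omega), List.rotate_rotate]
    rw [← List.rotate_mod l (off.toNat + (l.length - m)),
        ← List.rotate_mod l ((off - k) % (l.length : Int)).toNat]
    congr 1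
    have hlt2 : ((off - k) % (l.length : Int)).toNat < l.length := by
      have := Int.emod_lt_of_pos (off - k) hnI
      have := Int.emod_nonneg (off - k) (by omega : (l.length : Int) ≠ 0)
      omega
    rw [Nat.mod_eq_of_lt hlt2]
    apply emod_index (off - k) _ _ hn
    have hcast : ((off.toNat + (l.length - m) : Nat) : Int) = off + ((l.length : Int) - m) := by
      push_cast [Nat.cast_sub (le_of_lt hmlt)]
      omega
    rw [hcast, hmIr]
    have e1 : (off + ((l.length : Int) - k % (l.length : Int)))
        = (off - k % (l.length : Int)) + l.length := by ring
    rw [e1, ← Int.emod_eq_add_self_emod]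
    rw [Int.sub_emod off (k % (l.length : Int)), Int.emod_emod_of_dvd k dvd_rfl,
        ← Int.sub_emod off k]

lemma pyIdx?_emod (n : Nat) (a : Int) (hn : 0 < n) (h1 : -(n : Int) ≤ a) (h2 : a < n) :
    PySem.List.pyIdx? n a = some ((a % (n : Int)).toNat) := by
  unfold PySem.List.pyIdx?
  by_cases h : 0 ≤ a
  · rw [if_pos h, if_pos h2, Int.emod_eq_of_lt h h2]
  · rw [if_neg h, if_pos h1]
    have ha : a % (n : Int) = a + n := by
      rw [Int.emod_eq_add_self_emod]
      exact Int.emod_eq_of_lt (by omega) (by omega)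
    rw [ha]
    congr 1
    omega

lemma pyGet?_emod (l : List Char) (a : Int) (hn : 0 < l.length)
    (h1 : -(l.length : Int) ≤ a) (h2 : a < l.length) :
    PySem.List.pyGet? l a = l[(a % (l.length : Int)).toNat]? := by
  unfold PySem.List.pyGet?
  rw [pyIdx?_emod l.length a hn h1 h2, Option.bind_some]

lemma pySet?_emod (l : List Char) (a : Int) (v : Char) (hn : 0 < l.length)
    (h1 : -(l.length : Int) ≤ a) (h2 : a < l.length) :
    PySem.List.pySet? l a v = some (l.set (a % (l.length : Int)).toNat v) := by
  unfold PySem.List.pySet?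
  rw [pyIdx?_emod l.length a hn h1 h2, Option.map_some]

lemma emod_toNat_lt (a : Int) (n : Nat) (hn : 0 < n) : (a % (n : Int)).toNat < n := by
  have := Int.emod_lt_of_pos a (by exact_mod_cast hn : (0 : Int) < (n : Int))
  omega

lemma swapAB (l : List Char) (o : Nat) (ia ib : Int) (hn : 0 < l.length)
    (ha1 : -(l.length : Int) ≤ ia) (ha2 : ia < l.length)
    (hb1 : -(l.length : Int) ≤ ib) (hb2 : ib < l.length) :
    swapA (l.rotate o) ia ib
      = (swapB l ((ia + (o : Int)) % (l.length : Int)).toNat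
                 ((ib + (o : Int)) % (l.length : Int)).toNat).map (fun l' => l'.rotate o) := by
  set n := l.length with hnn
  set pa := ((ia + (o : Int)) % (n : Int)).toNat with hpa
  set pb := ((ib + (o : Int)) % (n : Int)).toNat with hpb
  have hpan : pa < n := emod_toNat_lt _ _ hn
  have hpbn : pb < n := emod_toNat_lt _ _ hn
  set L := l.rotate o with hL
  have hLlen : L.length = n := List.length_rotate l o
  set ia' := (ia % (n : Int)).toNat with hia'
  set ib' := (ib % (n : Int)).toNat with hib'
  have hia'n : ia' < n := emod_toNat_lt _ _ hn
  have hib'n : ib' < n := emod_toNat_lt _ _ hn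
  have hiaeq : (ia' + o) % n = pa := by
    apply emod_index (ia + (o : Int)) _ _ hn
    have : ((ia' : Int)) = ia % (n : Int) := by
      have := Int.emod_nonneg ia (by omega : (n : Int) ≠ 0)
      omega
    push_cast [this]
    rw [Int.add_emod, Int.emod_emod_of_dvd ia dvd_rfl, ← Int.add_emod]
  have hibeq : (ib' + o) % n = pb := by
    apply emod_index (ib + (o : Int)) _ _ hn
    have : ((ib' : Int)) = ib % (n : Int) := by
      have := Int.emod_nonneg ib (by omega : (n : Int) ≠ 0)
      omega
    push_cast [this]
    rw [Int.add_emod, Int.emod_emod_of_dvd ib dvd_rfl, ← Int.add_emod]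
  have hLa : L[ia']'(by omega) = l[pa]'(by omega) := by
    rw [List.getElem_rotate]
    simp only [← hnn, hiaeq]
  have hLb : L[ib']'(by omega) = l[pb]'(by omega) := by
    rw [List.getElem_rotate]
    simp only [← hnn, hibeq]
  unfold swapA swapB
  rw [pyGet?_emod L ia (by omega) (by rw [hLlen]; exact ha1) (by rw [hLlen]; exact_mod_cast ha2),
      pyGet?_emod L ib (by omega) (by rw [hLlen]; exact hb1) (by rw [hLlen]; exact_mod_cast hb2)]
  simp only [hLlen]
  rw [List.getElem?_eq_getElem (by omega : ia' < L.length),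
      List.getElem?_eq_getElem (by omega : ib' < L.length)]
  rw [List.getElem?_eq_getElem (by omega : pa < l.length),
      List.getElem?_eq_getElem (by omega : pb < l.length)]
  simp only [Option.bind_some]
  rw [pySet?_emod L ia _ (by omega) (by rw [hLlen]; exact ha1) (by rw [hLlen]; exact_mod_cast ha2)]
  simp only [hLlen]
  have hset1 : L.set ia' (L[ib']'(by omega)) = (l.set pa (l[pb]'(by omega))).rotate o := by
    rw [hLb, hL, rotate_set l o ia' _ (by omega)]
    simp only [← hnn, hiaeq]
  rw [← hia']
  simp only [Option.bind_some, hset1]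
  rw [pySet?_emod ((l.set pa (l[pb]'(by omega))).rotate o) ib _ (by simp only [List.length_rotate, List.length_set]; omega)
      (by simp only [List.length_rotate, List.length_set, ← hnn]; exact hb1)
      (by simp only [List.length_rotate, List.length_set, ← hnn]; exact_mod_cast hb2)]
  simp only [List.length_rotate, List.length_set, ← hnn]
  rw [← hib']
  have hset2 : ((l.set pa (l[pb]'(by omega))).rotate o).set ib' (L[ia']'(by omega))
      = ((l.set pa (l[pb]'(by omega))).set pb (l[pa]'(by omega))).rotate o := by
    rw [hLa, rotate_set _ o ib' _ (by simp only [List.length_set]; omega)]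
    simp only [List.length_set, ← hnn, hibeq]
  simp only [hset2, Option.map_some]

lemma findA_eq (l t : List Char) : ∀ i, findA l t i
    = (l.findIdx? (fun c => decide (t = [c]))).map (· + i) := by
  induction l with
  | nil => intro i; simp [findA]
  | cons c rest ih =>
    intro i
    rw [findA, List.findIdx?_cons]
    by_cases h : t = [c]
    · simp [h]
    · simp only [h, decide_eq_true_eq, if_false]
      rw [ih (i + 1)]
      cases rest.findIdx? (fun c => decide (t = [c]))
      · simp
      · simp
        omega

lemma pfind_go (l : List Char) (off : Int) (t : List Char)
    (h0 : 0 ≤ off) (h1 : off < l.length) :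
    ∀ f k, k + f = l.length →
    pfindGo l off t k f
      = (((l.rotate off.toNat).drop k).findIdx? (fun c => decide (t = [c]))).map
          (fun j => (k + j + off.toNat) % l.length) := by
  have hn : 0 < l.length := by omega
  intro f
  induction f with
  | zero =>
    intro k hk
    simp only [pfindGo]
    rw [show k = (l.rotate off.toNat).length by rw [List.length_rotate]; omega]
    rw [List.drop_length]
    simp
  | succ f ih =>
    intro k hk
    have hkn : k < l.length := by omega
    simp only [pfindGo]
    have hp : (PySem.Int.mod ((k : Int) + off) (l.length : Int)).toNat
        = (k + off.toNat) % l.length := by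
      rw [PySem.Int.mod_eq_emod_of_pos (by exact_mod_cast hn)]
      symm
      apply emod_index ((k : Int) + off) _ _ hn
      have hcast : ((k + off.toNat : Nat) : Int) = (k : Int) + off := by push_cast; omega
      rw [hcast]
    have hklt : k < (l.rotate off.toNat).length := by rw [List.length_rotate]; omega
    have hget : l[(k + off.toNat) % l.length]'(Nat.mod_lt _ hn)
        = (l.rotate off.toNat)[k]'hklt := by
      rw [List.getElem_rotate]
    have hdrop : (l.rotate off.toNat).drop k
        = (l.rotate off.toNat)[k]'hklt :: (l.rotate off.toNat).drop (k + 1) :=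
      (List.getElem_cons_drop hklt).symm
    simp only [hp]
    rw [List.getElem?_eq_getElem (Nat.mod_lt _ hn), hget, hdrop, List.findIdx?_cons]
    by_cases hmatch : t = [(l.rotate off.toNat)[k]'hklt]
    · simp only [hmatch, decide_true]
      simp
    · simp only [hmatch, decide_eq_true_eq, if_false]
      rw [ih (k + 1) (by omega)]
      cases ((l.rotate off.toNat).drop (k + 1)).findIdx? (fun c => decide (t = [c])) with
      | none => simp
      | some j =>
        simp only [Option.map_some]
        rw [show k + (j + 1) + off.toNat = k + 1 + j + off.toNat by omega]

lemma swapB_eq (l : List Char) (i j : Nat) (hi : i < l.length) (hj : j < l.length) :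
    swapB l i j = some ((l.set i (l[j]'hj)).set j (l[i]'hi)) := by
  unfold swapB
  rw [List.getElem?_eq_getElem hi, List.getElem?_eq_getElem hj]
  simp only [Option.bind_some]

lemma nat_index_eq (ka o n : Nat) (hn : 0 < n) :
    (((ka : Int) + (o : Int)) % (n : Int)).toNat = (ka + o) % n := by
  symm
  apply emod_index ((ka : Int) + (o : Int)) _ _ hn
  push_cast
  rfl

lemma step_corr (cs instr lst : List Char) (off : Int)
    (hpre : preInstrB cs instr = true) (hperm : lst.Perm cs) (hinv : BInv lst off) :
    ∃ lst' off', stepB (lst, off) instr = some (lst', off') ∧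
      stepA (lst.rotate off.toNat) instr = some (lst'.rotate off'.toNat) ∧
      lst'.Perm cs ∧ BInv lst' off' := by
  have hlen : lst.length = cs.length := hperm.length_eq
  cases instr with
  | nil => simp [preInstrB] at hpre
  | cons c rest =>
    by_cases hs : c = 's'
    · -- spin
      subst hs
      rw [preInstrB, if_pos rfl] at hpre
      obtain ⟨k, hk⟩ := Option.isSome_iff_exists.mp hpre
      refine ⟨lst, (if lst.length = 0 then 0 else PySem.Int.mod (off - k) (lst.length : Int)),
        ?_, ?_, hperm, ?_⟩
      · simp [stepB, hk]
      · have hr := rotate_spin lst off k hinv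
        simp [stepA, hk, hr]
      · by_cases h0 : lst.length = 0
        · rw [if_pos h0]
          exact Or.inl ⟨List.eq_nil_of_length_eq_zero h0, rfl⟩
        · rw [if_neg h0]
          have hnI : (0 : Int) < (lst.length : Int) := by omega
          exact Or.inr ⟨PySem.Int.mod_nonneg _ hnI, PySem.Int.mod_lt _ hnI⟩
    · by_cases hx : c = 'x'
      · -- exchange by positions
        subst hx
        rw [preInstrB, if_neg (by decide), if_pos rfl] at hpre
        cases hsp : PySem.Chars.splitOn rest ['/'] with
        | nil => simp only [hsp] at hpre; simp at hpre
        | cons sa tl =>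
        cases tl with
        | nil => simp only [hsp] at hpre; simp at hpre
        | cons sb tl2 =>
        cases tl2 with
        | cons x tl3 => simp only [hsp] at hpre; simp at hpre
        | nil =>
        simp only [hsp] at hpre
        cases ha : PySem.Int.ofChars? sa with
        | none => simp only [ha] at hpre; simp at hpre
        | some a =>
        cases hb : PySem.Int.ofChars? sb with
        | none => simp only [ha, hb] at hpre; simp at hpre
        | some b =>
        simp only [ha, hb] at hpre
        simp only [Bool.and_eq_true, decide_eq_true_eq] at hpre
        obtain ⟨⟨⟨ha1, ha2⟩, hb1⟩, hb2⟩ := hpre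
        rw [← hlen] at ha1 ha2 hb1 hb2
        have hn : 0 < lst.length := by omega
        have hinv' : 0 ≤ off ∧ off < lst.length := by
          rcases hinv with ⟨h1, _⟩ | h
          · rw [h1] at hn; simp at hn
          · exact h
        have hoInt : ((off.toNat : Int)) = off := by omega
        have hpan : ((a + off) % (lst.length : Int)).toNat < lst.length :=
          emod_toNat_lt _ _ hn
        have hpbn : ((b + off) % (lst.length : Int)).toNat < lst.length :=
          emod_toNat_lt _ _ hn
        refine ⟨(lst.set ((a + off) % (lst.length : Int)).toNat
              (lst[((b + off) % (lst.length : Int)).toNat]'hpbn)).set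
              ((b + off) % (lst.length : Int)).toNat
              (lst[((a + off) % (lst.length : Int)).toNat]'hpan), off, ?_, ?_, ?_,
            Or.inr ⟨hinv'.1, by simpa using hinv'.2⟩⟩
        · simp only [stepB, hsp, ha, hb, reduceIte, if_neg (by decide : ¬ ('x' = 's')),
            if_neg (by omega : ¬ lst.length = 0)]
          rw [PySem.Int.mod_eq_emod_of_pos (by omega : (0:Int) < (lst.length : Int)),
              PySem.Int.mod_eq_emod_of_pos (by omega : (0:Int) < (lst.length : Int))]
          rw [swapB_eq lst _ _ hpan hpbn, Option.map_some]
        · simp only [stepA, hsp, ha, hb, reduceIte, if_neg (by decide : ¬ ('x' = 's'))]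
          rw [swapAB lst off.toNat a b hn ha1 ha2 hb1 hb2]
          rw [hoInt]
          rw [swapB_eq lst _ _ hpan hpbn, Option.map_some]
        · exact (List.set_set_perm hpan hpbn).trans hperm
      · by_cases hp : c = 'p'
        · -- exchange by names
          subst hp
          rw [preInstrB, if_neg (by decide), if_neg (by decide), if_pos rfl] at hpre
          cases hsp : PySem.Chars.splitOn rest ['/'] with
          | nil => simp only [hsp] at hpre; simp at hpre
          | cons sa tl =>
          cases tl with
          | nil => simp only [hsp] at hpre; simp at hpre
          | cons sb tl2 =>
          cases tl2 with
          | cons x tl3 => simp only [hsp] at hpre; simp at hpre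
          | nil =>
          simp only [hsp, Bool.and_eq_true, List.any_eq_true, decide_eq_true_eq] at hpre
          obtain ⟨⟨ca, hca, hsa⟩, ⟨cb, hcb, hsb⟩⟩ := hpre
          have hcal : ca ∈ lst := hperm.mem_iff.mpr hca
          have hcbl : cb ∈ lst := hperm.mem_iff.mpr hcb
          have hn : 0 < lst.length := List.length_pos_of_mem hcal
          have hinv' : 0 ≤ off ∧ off < lst.length := by
            rcases hinv with ⟨h1, _⟩ | h
            · rw [h1] at hn; simp at hn
            · exact h
          set L := lst.rotate off.toNat with hL
          have hLlen : L.length = lst.length := List.length_rotate lst off.toNat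
          have hcaL : ca ∈ L := ((List.rotate_perm lst off.toNat).mem_iff).mpr hcal
          have hcbL : cb ∈ L := ((List.rotate_perm lst off.toNat).mem_iff).mpr hcbl
          have hfa : L.findIdx? (fun c => decide (sa = [c])) ≠ none := by
            intro h
            rw [List.findIdx?_eq_none_iff] at h
            have := h ca hcaL
            rw [hsa] at this
            simp at this
          have hfb : L.findIdx? (fun c => decide (sb = [c])) ≠ none := by
            intro h
            rw [List.findIdx?_eq_none_iff] at h
            have := h cb hcbL
            rw [hsb] at this
            simp at this
          obtain ⟨ka, hka⟩ := Option.ne_none_iff_exists'.mp hfa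
          obtain ⟨kb, hkb⟩ := Option.ne_none_iff_exists'.mp hfb
          have hkan : ka < lst.length := by
            have := (List.findIdx?_eq_some_iff_getElem.mp hka).1
            omega
          have hkbn : kb < lst.length := by
            have := (List.findIdx?_eq_some_iff_getElem.mp hkb).1
            omega
          have hpfa : pfindB lst off sa = some ((ka + off.toNat) % lst.length) := by
            rw [pfindB, pfind_go lst off sa hinv'.1 hinv'.2 lst.length 0 (by omega)]
            rw [List.drop_zero, ← hL, hka, Option.map_some, Nat.zero_add]
          have hpfb : pfindB lst off sb = some ((kb + off.toNat) % lst.length) := by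
            rw [pfindB, pfind_go lst off sb hinv'.1 hinv'.2 lst.length 0 (by omega)]
            rw [List.drop_zero, ← hL, hkb, Option.map_some, Nat.zero_add]
          have hpan : (ka + off.toNat) % lst.length < lst.length := Nat.mod_lt _ hn
          have hpbn : (kb + off.toNat) % lst.length < lst.length := Nat.mod_lt _ hn
          refine ⟨(lst.set ((ka + off.toNat) % lst.length)
                (lst[(kb + off.toNat) % lst.length]'hpbn)).set ((kb + off.toNat) % lst.length)
                (lst[(ka + off.toNat) % lst.length]'hpan), off, ?_, ?_, ?_,
              Or.inr ⟨hinv'.1, by simpa using hinv'.2⟩⟩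
          · simp only [stepB, hsp, hpfa, hpfb, reduceIte, if_neg (by decide : ¬ ('p' = 's')),
              if_neg (by decide : ¬ ('p' = 'x'))]
            rw [swapB_eq lst _ _ hpan hpbn, Option.map_some]
          · simp only [stepA, hsp, reduceIte, if_neg (by decide : ¬ ('p' = 's')),
              if_neg (by decide : ¬ ('p' = 'x')), findA_eq L sa 0, findA_eq L sb 0, hka, hkb,
              Option.map_some, Nat.add_zero]
            rw [swapAB lst off.toNat (ka : Int) (kb : Int) hn
                (by omega) (by exact_mod_cast hkan) (by omega) (by exact_mod_cast hkbn)]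
            rw [nat_index_eq ka off.toNat lst.length hn, nat_index_eq kb off.toNat lst.length hn]
            rw [swapB_eq lst _ _ hpan hpbn, Option.map_some]
          · exact (List.set_set_perm hpan hpbn).trans hperm
        · -- any other opcode: no-op
          refine ⟨lst, off, ?_, ?_, hperm, hinv⟩
          · simp [stepB, hs, hx, hp]
          · simp [stepA, hs, hx, hp]

lemma fold_corr (instrs : List (List Char)) (cs : List Char) :
    ∀ (lst : List Char) (off : Int),
    (∀ i ∈ instrs, preInstrB cs i = true) → lst.Perm cs → BInv lst off →
    ∃ lst' off',
      instrs.foldl (fun acc instr => acc.bind (fun st => stepB st instr)) (some (lst, off))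
        = some (lst', off') ∧
      instrs.foldl (fun acc instr => acc.bind (fun st => stepA st instr))
          (some (lst.rotate off.toNat)) = some (lst'.rotate off'.toNat) ∧
      lst'.Perm cs ∧ BInv lst' off' := by
  induction instrs with
  | nil => intro lst off _ hperm hinv; exact ⟨lst, off, rfl, rfl, hperm, hinv⟩
  | cons i rest ih =>
    intro lst off hpre hperm hinv
    obtain ⟨l1, o1, hB, hA, hp1, hi1⟩ := step_corr cs i lst off (hpre i (by simp)) hperm hinv
    obtain ⟨l2, o2, hB2, hA2, hp2, hi2⟩ := ih l1 o1 (fun j hj => hpre j (by simp [hj])) hp1 hi1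
    refine ⟨l2, o2, ?_, ?_, hp2, hi2⟩
    · simpa [hB] using hB2
    · simpa [hA] using hA2

-- ===== VERDICT (by name: the statement is the Claim_ definition above) =====
theorem solve_spec : Claim_equal_solve := by
  intro data start _ hpre
  unfold Spec_solve solve solve_alt
  have hpre' : ∀ i ∈ PySem.Chars.splitOn data.toList [','], preInstrB start.toList i = true := by
    intro i hi
    exact List.all_eq_true.mp hpre i hi
  have hinv : BInv start.toList 0 := by
    rcases start.toList with _ | ⟨c, rest⟩
    · exact Or.inl ⟨rfl, rfl⟩
    · exact Or.inr ⟨le_refl _, by simp⟩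
  obtain ⟨lst', off', hB, hA, hp, hi⟩ :=
    fold_corr (PySem.Chars.splitOn data.toList [',']) start.toList start.toList 0
      hpre' (List.Perm.refl _) hinv
  rw [hB]
  rw [show (Int.toNat 0) = 0 from rfl, List.rotate_zero] at hA
  rw [hA]
  have hle : off'.toNat ≤ lst'.length := by
    rcases hi with ⟨h1, h2⟩ | ⟨h1, h2⟩
    · simp [h1, h2]
    · omega
  rw [List.rotate_eq_drop_append_take hle]
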